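-- pv_equiv track=rewrite | github.com/clio-janelia/clio-store | services/annotations_global.py | remove_reserved_fields
-- ===== SOURCE A (Python) =====
-- def remove_reserved_fields(data: dict):
--     """Returns copy of the dict with any reserved fields removed"""
--     del_list = []
--     for field in data:
--         if field.startswith("_"):
--             del_list.append(field)
--     if len(del_list) != 0:
--         output = data.copy()
--         for field in del_list:
--             del output[field]
--         return output
--     return data
-- ===== SOURCE B (Python) =====
-- def remove_reserved_fields(data: dict):
--     """Returns copy of the dict with any reserved fields removed"""
--     if any(k.startswith("_") for k in data):
--         return {k: v for k, v in data.items() if not k.startswith("_")}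
--     return data
-- ===== Notes on version B (the rewrite author's own statement) =====
-- stated objective: simpler
-- what changed: Replaces A's accumulate-a-del_list-then-copy-and-delete structure with a single detect pass followed by one constructive filtering comprehension; no intermediate list or mutated copy is maintained.
import Mathlib
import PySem

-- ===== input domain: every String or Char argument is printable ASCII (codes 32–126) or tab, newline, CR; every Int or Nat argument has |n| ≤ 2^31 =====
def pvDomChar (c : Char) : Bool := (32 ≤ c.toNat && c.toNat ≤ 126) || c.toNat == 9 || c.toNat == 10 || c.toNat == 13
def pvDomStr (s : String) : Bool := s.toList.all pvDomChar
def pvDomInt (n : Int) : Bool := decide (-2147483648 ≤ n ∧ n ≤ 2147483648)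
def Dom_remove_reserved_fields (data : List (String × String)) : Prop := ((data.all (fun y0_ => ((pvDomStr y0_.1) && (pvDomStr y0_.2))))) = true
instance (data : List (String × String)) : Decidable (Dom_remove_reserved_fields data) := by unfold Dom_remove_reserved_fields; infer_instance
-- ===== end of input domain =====

-- B is a simpler detect-then-rebuild decomposition of A's accumulate/copy/delete loop;
-- equivalence of the RETURN value only (when no reserved key exists, Python A returns the
-- original dict object while B also returns it unchanged).

-- ===== PORT A =====
-- 'del output[field]' on the dict, as removal of the first pair with that key
def pyDelKey (out : List (String × String)) (k : String) : List (String × String) :=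
  match out with
  | [] => []
  | p :: rest => if p.1 == k then rest else p :: pyDelKey rest k

def remove_reserved_fields (data : List (String × String)) : List (String × String) :=
  let del_list : List String :=
    data.foldl (fun acc p => if PySem.Str.startswith p.1 "_" then acc ++ [p.1] else acc) []
  if del_list.length ≠ 0 then
    del_list.foldl (fun output field => pyDelKey output field) data
  else
    data

-- ===== PORT B =====
def remove_reserved_fields_alt (data : List (String × String)) : List (String × String) :=
  if data.any (fun p => PySem.Str.startswith p.1 "_") then
    data.filter (fun p => !PySem.Str.startswith p.1 "_")
  else
    data

-- ===== PRECONDITION & SPEC =====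
def Spec_remove_reserved_fields (data : List (String × String)) (out : List (String × String)) : Prop := out = remove_reserved_fields_alt data
instance (data : List (String × String)) (out : List (String × String)) : Decidable (Spec_remove_reserved_fields data out) := by unfold Spec_remove_reserved_fields; infer_instance

-- ===== CLAIM (what is proved, stated in full; the proofs are below) =====
def Claim_equal_remove_reserved_fields : Prop := ∀ (data : List (String × String)), Dom_remove_reserved_fields data → Spec_remove_reserved_fields data (remove_reserved_fields data)

-- ===== LEMMAS AND PROOFS =====

-- deleting keys that all satisfy the underscore test skips past a pair whose key does not
theorem foldl_pyDelKey_cons (p : String × String) (l : List (String × String))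
    (ks : List String) (hp : PySem.Str.startswith p.1 "_" = false)
    (hks : ∀ k ∈ ks, PySem.Str.startswith k "_" = true) :
    ks.foldl (fun output field => pyDelKey output field) (p :: l)
      = p :: ks.foldl (fun output field => pyDelKey output field) l := by
  induction ks generalizing l with
  | nil => rfl
  | cons k ks ih =>
    have hk : PySem.Str.startswith k "_" = true := hks k (List.mem_cons_self ..)
    have hne : (p.1 == k) = false := by
      apply beq_eq_false_iff_ne.mpr
      intro he; rw [he, hk] at hp; cases hp
    simp only [List.foldl_cons, pyDelKey, hne, Bool.false_eq_true, if_false]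
    exact ih (pyDelKey l k) (fun k' hk' => hks k' (List.mem_cons_of_mem _ hk'))

-- the delete-loop over the underscore keys (in order, with multiplicity) computes the filter
theorem foldl_pyDelKey_eq_filter (data : List (String × String)) :
    ((data.filter (fun p => PySem.Str.startswith p.1 "_")).map (·.1)).foldl
        (fun output field => pyDelKey output field) data
      = data.filter (fun p => !PySem.Str.startswith p.1 "_") := by
  induction data with
  | nil => rfl
  | cons p rest ih =>
    by_cases hp : PySem.Str.startswith p.1 "_" = true
    · rw [List.filter_cons, if_pos hp, List.map_cons, List.foldl_cons]
      have hdel : pyDelKey (p :: rest) p.1 = rest := by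
        simp only [pyDelKey, BEq.rfl, if_pos trivial]
      rw [hdel, ih, List.filter_cons, if_neg (by rw [hp]; simp)]
    · have hp' : PySem.Str.startswith p.1 "_" = false := Bool.eq_false_iff.mpr hp
      rw [List.filter_cons, if_neg (by rw [hp']; simp)]
      rw [foldl_pyDelKey_cons p rest _ hp'
        (by intro k hk
            rcases List.mem_map.mp hk with ⟨q, hq, rfl⟩
            exact (List.mem_filter.mp hq).2)]
      rw [ih, List.filter_cons, if_pos (by rw [hp']; rfl)]

theorem remove_eq_filter (data : List (String × String)) :
    remove_reserved_fields data = data.filter (fun p => !PySem.Str.startswith p.1 "_") := by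
  unfold remove_reserved_fields
  rw [PySem.List.foldl_append_if (p := fun q : String × String => PySem.Str.startswith q.1 "_")
    (f := fun q : String × String => q.1), List.nil_append]
  by_cases h : ((data.filter (fun p => PySem.Str.startswith p.1 "_")).map (·.1)).length ≠ 0
  · rw [if_pos h]; exact foldl_pyDelKey_eq_filter data
  · rw [if_neg h]
    have hnil : data.filter (fun p => PySem.Str.startswith p.1 "_") = [] := by
      apply List.length_eq_zero_iff.mp
      have := not_not.mp h
      rwa [List.length_map] at this
    rw [List.filter_eq_self.mpr]
    intro p hp
    have hpf : PySem.Str.startswith p.1 "_" = false := by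
      cases hc : PySem.Str.startswith p.1 "_" with
      | false => rfl
      | true =>
        have hm : p ∈ data.filter (fun q => PySem.Str.startswith q.1 "_") :=
          List.mem_filter.mpr ⟨hp, hc⟩
        rw [hnil] at hm; cases hm
    rw [hpf]; rfl

theorem alt_eq_filter (data : List (String × String)) :
    remove_reserved_fields_alt data = data.filter (fun p => !PySem.Str.startswith p.1 "_") := by
  unfold remove_reserved_fields_alt
  by_cases h : data.any (fun p => PySem.Str.startswith p.1 "_") = true
  · rw [if_pos h]
  · rw [if_neg h]
    rw [List.filter_eq_self.mpr]
    intro p hp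
    have hpf : PySem.Str.startswith p.1 "_" = false := by
      cases hc : PySem.Str.startswith p.1 "_" with
      | false => rfl
      | true => exact absurd (List.any_eq_true.mpr ⟨p, hp, hc⟩) h
    rw [hpf]; rfl

-- ===== VERDICT (by name: the statement is the Claim_ definition above) =====
theorem remove_reserved_fields_spec : Claim_equal_remove_reserved_fields := by
  intro data _
  unfold Spec_remove_reserved_fields
  rw [remove_eq_filter, alt_eq_filter]
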